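-- pv_equiv track=rewrite | github.com/TabbycatDebate/tabbycat | tabbycat/breakqual/liveness.py | get_bp_coefficients
-- ===== SOURCE A (Python) =====
-- from math import ceil, factorial, floor
--
-- def ncr(n, r):
--     try:
--         binom = factorial(n) // factorial(r) // factorial(n - r)
--     except ValueError:
--         binom = 0
--     return binom
--
-- def get_bp_coefficients(nrounds):
--     """Get row of the number of rounds from the quadrinomial coefficients
--     triangle (similar to Pascal's triangle).
--
--     See: https://oeis.org/A008287"""
--
--     def get_coefficient(m, k):
--         coeff = 0
--         for i in range(0, floor(k / 2) + 1):
--             coeff += ncr(m, i) * ncr(m, k - 2 * i)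
--         return coeff
--
--     half_row = [get_coefficient(nrounds, k) for k in range(0, ceil((3 * nrounds + 1) / 2))]
--
--     if nrounds == 0:
--         return half_row
--
--     if nrounds % 2 == 1:
--         return half_row + half_row[::-1]
--
--     return half_row + half_row[-2::-1]
-- ===== SOURCE B (Python) =====
-- def get_bp_coefficients(nrounds):
--     """Row nrounds of the quadrinomial triangle (OEIS A008287), built by
--     iterated convolution with (1, 1, 1, 1) instead of binomial sums."""
--     if nrounds < 0:
--         return []
--     row = [1]
--     for _ in range(nrounds):
--         m = len(row)
--         new = []
--         for j in range(m + 3):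
--             s = 0
--             for d in range(4):
--                 if 0 <= j - d < m:
--                     s += row[j - d]
--             new.append(s)
--         row = new
--     return row
-- ===== Notes on version B (the rewrite author's own statement) =====
-- stated objective: faster
-- what changed: B builds the whole row by iterated convolution with (1,1,1,1) (each entry the sum of four neighbours of the previous row, no mirroring) instead of A's per-entry sums of binomial-coefficient products with factorials recomputed for every term; intended as faster, measured 20.4x at the largest size both finished (n=256).
import Mathlib
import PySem

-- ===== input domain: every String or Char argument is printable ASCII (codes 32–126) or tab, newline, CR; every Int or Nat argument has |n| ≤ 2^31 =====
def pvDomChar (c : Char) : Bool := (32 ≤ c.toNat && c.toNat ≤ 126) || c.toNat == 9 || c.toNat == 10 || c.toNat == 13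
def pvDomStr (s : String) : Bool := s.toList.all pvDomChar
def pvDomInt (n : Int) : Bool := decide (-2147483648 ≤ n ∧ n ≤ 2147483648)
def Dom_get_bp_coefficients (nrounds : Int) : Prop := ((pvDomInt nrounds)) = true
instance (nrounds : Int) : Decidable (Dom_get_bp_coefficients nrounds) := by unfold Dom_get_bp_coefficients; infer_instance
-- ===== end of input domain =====

-- B replaces A's per-entry binomial-product sums (with factorials recomputed for every term)
-- by building the row once through iterated convolution with (1,1,1,1); intended as faster
-- (measured 20.4x at the largest size both finished); equivalence is proved for every Int
-- input in Dom (both return [] for negative nrounds).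

-- ===== PORT A =====

-- math.factorial: raises ValueError on negative input (none); exact on integers
def pyfactorial? (n : Int) : Option Int :=
  if n < 0 then none else some ((Nat.factorial n.toNat : Nat) : Int)

-- ncr: try/except ValueError -> 0
def ncr (n r : Int) : Int :=
  match pyfactorial? n, pyfactorial? r, pyfactorial? (n - r) with
  | some fn, some fr, some fnr => PySem.Int.floordiv (PySem.Int.floordiv fn fr) fnr
  | _, _, _ => 0

-- inner helper get_coefficient; floor(k / 2) on Python floats is exact for |k| ≤ 2^53,
-- which Dom guarantees, so it is ported as floor division by 2
def get_coefficient (m k : Int) : Int :=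
  (PySem.List.pyRange 0 (PySem.Int.floordiv k 2 + 1) 1).foldl
    (fun coeff i => coeff + ncr m i * ncr m (k - 2 * i)) 0

-- ceil((3*nrounds+1)/2) on Python floats is exact for |nrounds| ≤ 2^31 (Dom), ported as
-- ceiling division -((-(3n+1)) // 2); xs[::-1] is reverse, xs[-2::-1] is dropLast.reverse
-- (both exact for every list, matching CPython slice semantics)
def get_bp_coefficients (nrounds : Int) : List Int :=
  let half_row :=
    (PySem.List.pyRange 0 (-(PySem.Int.floordiv (-(3 * nrounds + 1)) 2)) 1).map
      (fun k => get_coefficient nrounds k)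
  if nrounds = 0 then half_row
  else if PySem.Int.mod nrounds 2 = 1 then half_row ++ half_row.reverse
  else half_row ++ half_row.dropLast.reverse

-- ===== PORT B =====
def get_bp_coefficients_alt (nrounds : Int) : List Int :=
  if nrounds < 0 then []
  else
    (PySem.List.pyRange 0 nrounds 1).foldl
      (fun row _ =>
        let m : Int := row.length
        (PySem.List.pyRange 0 (m + 3) 1).foldl
          (fun new j =>
            new ++ [(PySem.List.pyRange 0 4 1).foldl
              (fun s d =>
                if 0 ≤ j - d ∧ j - d < m then s + PySem.List.pyGetD row (j - d) 0 else s) 0])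
          [])
      [1]

-- ===== PRECONDITION & SPEC =====
def Spec_get_bp_coefficients (nrounds : Int) (out : List Int) : Prop := out = get_bp_coefficients_alt nrounds
instance (nrounds : Int) (out : List Int) : Decidable (Spec_get_bp_coefficients nrounds out) := by unfold Spec_get_bp_coefficients; infer_instance

-- ===== CLAIM (what is proved, stated in full; the proofs are below) =====
def Claim_equal_get_bp_coefficients : Prop := ∀ (nrounds : Int), Dom_get_bp_coefficients nrounds → Spec_get_bp_coefficients nrounds (get_bp_coefficients nrounds)

-- ===== LEMMAS AND PROOFS =====

def cho (n : Nat) (k : Int) : Int := if k < 0 then 0 else ((n.choose k.toNat : Nat) : Int)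
def Q (n : Nat) (k : Int) : Int := ∑ i ∈ Finset.range (n + 1), cho n i * cho n (k - 2 * i)
theorem cho_neg {n : Nat} {k : Int} (h : k < 0) : cho n k = 0 := by simp [cho, h]
theorem cho_gt {n : Nat} {k : Int} (h : (n : Int) < k) : cho n k = 0 := by
  unfold cho; rw [if_neg (by omega)]; rw [Nat.choose_eq_zero_of_lt (by omega)]; simp
theorem Q_neg {n : Nat} {k : Int} (h : k < 0) : Q n k = 0 := by
  unfold Q
  apply Finset.sum_eq_zero
  intro i hi
  simp only [Finset.mem_range] at hi
  rw [cho_neg (show k - 2 * (i : Int) < 0 by omega)]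
  ring

theorem Q_gt {n : Nat} {k : Int} (h : 3 * (n : Int) < k) : Q n k = 0 := by
  unfold Q
  apply Finset.sum_eq_zero
  intro i hi
  simp only [Finset.mem_range] at hi
  rw [cho_gt (show (n : Int) < k - 2 * i by omega)]
  ring

theorem cho_succ (n : Nat) (k : Int) : cho (n + 1) k = cho n k + cho n (k - 1) := by
  unfold cho
  rcases lt_trichotomy k 0 with hk | hk | hk
  · rw [if_pos hk, if_pos hk, if_pos (by omega)]; ring
  · subst hk; norm_num
  · rw [if_neg (by omega), if_neg (by omega), if_neg (by omega)]
    obtain ⟨m, rfl⟩ : ∃ m : Nat, k = (m : Int) + 1 := ⟨(k - 1).toNat, by omega⟩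
    have h1 : ((m : Int) + 1).toNat = m + 1 := by omega
    have h2 : ((m : Int) + 1 - 1).toNat = m := by omega
    rw [h1, h2, Nat.choose_succ_succ]; push_cast; ring

theorem Q_succ (n : Nat) (k : Int) :
    Q (n + 1) k = Q n k + Q n (k - 1) + Q n (k - 2) + Q n (k - 3) := by
  unfold Q
  have step : ∀ i : Nat,
      cho (n+1) (i : Int) * cho (n+1) (k - 2*(i : Int)) =
        (cho n i * cho n (k - 2*(i:Int)) + cho n i * cho n (k - 1 - 2*(i:Int)))
        + (cho n ((i:Int) - 1) * cho n (k - 2*(i:Int)) + cho n ((i:Int) - 1) * cho n (k - 2*(i:Int) - 1)) := by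
    intro i
    rw [cho_succ, cho_succ]
    have : k - 2*(i:Int) - 1 = k - 1 - 2*(i:Int) := by ring
    rw [this]; ring
  rw [Finset.sum_congr rfl (fun i _ => step i)]
  rw [Finset.sum_add_distrib, Finset.sum_add_distrib, Finset.sum_add_distrib]
  have e1 : ∑ i ∈ Finset.range (n+1+1), cho n i * cho n (k - 2*(i:Int)) = Q n k := by
    rw [Finset.sum_range_succ, Q]
    rw [cho_gt (show (n:Int) < ((n+1 : Nat) : Int) by push_cast; omega)]
    ring
  have e2 : ∑ i ∈ Finset.range (n+1+1), cho n i * cho n (k - 1 - 2*(i:Int)) = Q n (k-1) := by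
    rw [Finset.sum_range_succ, Q]
    rw [cho_gt (show (n:Int) < ((n+1 : Nat) : Int) by push_cast; omega)]
    ring
  have e3 : ∑ i ∈ Finset.range (n+1+1), cho n ((i:Int) - 1) * cho n (k - 2*(i:Int)) = Q n (k-2) := by
    rw [Finset.sum_range_succ']
    simp only [Nat.cast_add, Nat.cast_one, Nat.cast_zero]
    rw [cho_neg (show (0:Int) - 1 < 0 by omega)]
    rw [Q]
    have : ∀ i ∈ Finset.range (n+1), cho n ((i:Int) + 1 - 1) * cho n (k - 2*((i:Int)+1)) = cho n i * cho n (k - 2 - 2*(i:Int)) := by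
      intro i _
      have a1 : (i:Int) + 1 - 1 = (i:Int) := by ring
      have a2 : k - 2*((i:Int)+1) = k - 2 - 2*(i:Int) := by ring
      rw [a1, a2]
    rw [Finset.sum_congr rfl this]
    ring
  have e4 : ∑ i ∈ Finset.range (n+1+1), cho n ((i:Int) - 1) * cho n (k - 2*(i:Int) - 1) = Q n (k-3) := by
    rw [Finset.sum_range_succ']
    simp only [Nat.cast_add, Nat.cast_one, Nat.cast_zero]
    rw [cho_neg (show (0:Int) - 1 < 0 by omega)]
    rw [Q]
    have : ∀ i ∈ Finset.range (n+1), cho n ((i:Int) + 1 - 1) * cho n (k - 2*((i:Int)+1) - 1) = cho n i * cho n (k - 3 - 2*(i:Int)) := by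
      intro i _
      have a1 : (i:Int) + 1 - 1 = (i:Int) := by ring
      have a2 : k - 2*((i:Int)+1) - 1 = k - 3 - 2*(i:Int) := by ring
      rw [a1, a2]
    rw [Finset.sum_congr rfl this]
    ring
  rw [e1, e2, e3, e4]
  unfold Q
  ring

theorem cho_zero_neg (k : Int) : cho 0 (-k) = cho 0 k := by
  unfold cho
  rcases lt_trichotomy k 0 with hk | hk | hk
  · rw [if_pos hk, if_neg (by omega), Nat.choose_eq_zero_of_lt (by omega)]; simp
  · subst hk; norm_num
  · rw [if_pos (by omega), if_neg (by omega), Nat.choose_eq_zero_of_lt (by omega)]; simp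

theorem Q_symm (n : Nat) (k : Int) : Q n (3 * n - k) = Q n k := by
  induction n generalizing k with
  | zero =>
    unfold Q
    rw [Finset.sum_range_one, Finset.sum_range_one]
    have h1 : (3:Int) * ((0:Nat):Int) - k - 2 * ((0:Nat):Int) = -k := by norm_num
    have h2 : k - 2 * ((0:Nat):Int) = k := by norm_num
    rw [h1, h2, cho_zero_neg]
  | succ n ih =>
    have harg : (3 : Int) * ((n : Int) + 1) - k = (3 * n - (k - 3)) := by ring
    rw [show ((n+1 : Nat) : Int) = (n : Int) + 1 by push_cast; ring] at *
    rw [harg, Q_succ, Q_succ]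
    have a1 : 3 * (n:Int) - (k - 3) - 1 = 3 * n - (k - 2) := by ring
    have a2 : 3 * (n:Int) - (k - 3) - 2 = 3 * n - (k - 1) := by ring
    have a3 : 3 * (n:Int) - (k - 3) - 3 = 3 * n - k := by ring
    rw [a1, a2, a3, ih, ih, ih, ih]
    ring

def rowQ (n : Nat) : List Int := (List.range (3 * n + 1)).map (fun j : Nat => Q n (j : Int))

def convStep (row : List Int) : List Int :=
  (PySem.List.pyRange 0 ((row.length : Int) + 3) 1).foldl
    (fun new j =>
      new ++ [(PySem.List.pyRange 0 4 1).foldl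
        (fun s d =>
          if 0 ≤ j - d ∧ j - d < (row.length : Int) then s + PySem.List.pyGetD row (j - d) 0 else s) 0])
    []

theorem alt_succ (t : Nat) :
    get_bp_coefficients_alt ((t : Int) + 1) = convStep (get_bp_coefficients_alt (t : Int)) := by
  unfold get_bp_coefficients_alt convStep
  rw [if_neg (by omega), if_neg (by omega)]
  rw [PySem.List.pyRange_one_succ_right (by omega : (0:Int) ≤ (t:Int))]
  rw [List.foldl_append]
  simp only [List.foldl_cons, List.foldl_nil]

theorem rowQ_get (t : Nat) (i : Int) (h0 : 0 ≤ i) (h1 : i < 3 * t + 1) :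
    PySem.List.pyGetD (rowQ t) i 0 = Q t i := by
  have key : ∀ (h : i.toNat < (rowQ t).length), (rowQ t)[i.toNat]'h = Q t (i.toNat : Int) := by
    intro h
    simp only [rowQ] at h ⊢
    rw [List.getElem_map, List.getElem_range]
  rw [PySem.List.pyGetD_eq_getElem (rowQ t) 0 h0 (by simp [rowQ]; omega), key,
    Int.toNat_of_nonneg h0]

theorem inner_eq (t : Nat) (j : Int) :
    (PySem.List.pyRange 0 4 1).foldl
      (fun s d =>
        if 0 ≤ j - d ∧ j - d < ((rowQ t).length : Int) then s + PySem.List.pyGetD (rowQ t) (j - d) 0 else s) 0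
      = Q (t + 1) j := by
  have hlen : ((rowQ t).length : Int) = 3 * t + 1 := by simp [rowQ]
  have hr : PySem.List.pyRange 0 4 1 = [0, 1, 2, 3] := by decide
  rw [hr]
  simp only [List.foldl_cons, List.foldl_nil, hlen]
  have term : ∀ d : Int, (if 0 ≤ j - d ∧ j - d < 3 * (t:Int) + 1 then PySem.List.pyGetD (rowQ t) (j - d) 0 else 0) = Q t (j - d) := by
    intro d
    split_ifs with h
    · exact rowQ_get t (j - d) h.1 (by omega)
    · rcases (by omega : j - d < 0 ∨ 3 * (t:Int) < j - d) with h' | h'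
      · exact (Q_neg h').symm
      · exact (Q_gt h').symm
  have ite_add : ∀ (c : Prop) [Decidable c] (s g : Int), (if c then s + g else s) = s + (if c then g else 0) := by
    intro c _ s g; split_ifs <;> ring
  simp only [ite_add]
  rw [term 0, term 1, term 2, term 3, Q_succ]
  norm_num

theorem map_pyRange_natCast {α : Type} (f : Int → α) (m : Nat) :
    (PySem.List.pyRange 0 (m : Int) 1).map f = (List.range m).map (fun k : Nat => f (k : Int)) := by
  rw [PySem.List.pyRange_one, List.map_map]
  have h : ((m : Int) - 0).toNat = m := by omega
  rw [h]
  apply List.map_congr_left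
  intro k _
  simp

theorem convStep_rowQ (t : Nat) : convStep (rowQ t) = rowQ (t + 1) := by
  unfold convStep
  rw [PySem.List.foldl_append_singleton_eq_map]
  have hlen : ((rowQ t).length : Int) + 3 = ((3 * (t + 1) + 1 : Nat) : Int) := by
    simp [rowQ]; ring
  rw [hlen, map_pyRange_natCast]
  unfold rowQ
  apply List.map_congr_left
  intro k hk
  exact inner_eq t (k : Int)

theorem alt_eq_rowQ (t : Nat) : get_bp_coefficients_alt (t : Int) = rowQ t := by
  induction t with
  | zero =>
    have h0 : rowQ 0 = [Q 0 0] := by simp [rowQ]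
    have h1 : Q 0 0 = 1 := by decide
    rw [h0, h1]
    decide
  | succ n ih =>
    rw [show ((n + 1 : Nat) : Int) = (n : Int) + 1 by push_cast; ring, alt_succ, ih, convStep_rowQ]


theorem ncr_eq (t : Nat) (r : Int) : ncr (t : Int) r = cho t r := by
  unfold ncr pyfactorial?
  by_cases hr : r < 0
  · rw [if_neg (by omega), if_pos hr]
    rw [cho_neg hr]
  · rw [if_neg (by omega), if_neg hr]
    by_cases hrt : (t : Int) - r < 0
    · rw [if_pos hrt, cho_gt (by omega)]
    · rw [if_neg hrt]
      simp only [Int.toNat_natCast]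
      set r' := r.toNat with hr'
      have hrr : r = (r' : Int) := by omega
      have htr : ((t : Int) - r).toNat = t - r' := by omega
      have hle : r' ≤ t := by omega
      rw [htr]
      have key : Nat.factorial t / Nat.factorial r' = t.choose r' * Nat.factorial (t - r') := by
        have h1 := Nat.choose_mul_factorial_mul_factorial hle
        have h2 : Nat.factorial t = (t.choose r' * Nat.factorial (t - r')) * Nat.factorial r' := by
          rw [← h1]; ring
        rw [h2, Nat.mul_div_cancel _ (Nat.factorial_pos r')]
      rw [show PySem.Int.floordiv ((Nat.factorial t : Nat) : Int) ((Nat.factorial r' : Nat) : Int)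
            = ((Nat.factorial t / Nat.factorial r' : Nat) : Int) from PySem.Int.floordiv_natCast _ _]
      rw [key]
      rw [show PySem.Int.floordiv (((t.choose r' * Nat.factorial (t - r') : Nat) : Int)) ((Nat.factorial (t - r') : Nat) : Int)
            = (((t.choose r' * Nat.factorial (t - r')) / Nat.factorial (t - r') : Nat) : Int) from PySem.Int.floordiv_natCast _ _]
      rw [Nat.mul_div_cancel _ (Nat.factorial_pos (t - r'))]
      unfold cho
      rw [if_neg (by omega), hrr]
      simp

theorem sum_map_range (n : Nat) (f : Nat → Int) :
    ((List.range n).map f).sum = ∑ i ∈ Finset.range n, f i := by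
  induction n with
  | zero => simp
  | succ m ih =>
    rw [List.range_succ, Finset.sum_range_succ, List.map_append, List.sum_append, ih]
    simp

theorem sum_ext_zero (a b : Nat) (hab : a ≤ b) (f : Nat → Int)
    (hz : ∀ i, a ≤ i → f i = 0) :
    ∑ i ∈ Finset.range a, f i = ∑ i ∈ Finset.range b, f i := by
  apply Finset.sum_subset
  · intro x hx
    simp only [Finset.mem_range] at hx ⊢
    omega
  · intro x _ hx
    exact hz x (by simpa using hx)

theorem get_coefficient_eq (t : Nat) (k : Int) (hk : 0 ≤ k) :
    get_coefficient (t : Int) k = Q t k := by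
  unfold get_coefficient
  rw [PySem.List.foldl_add]
  have hK : PySem.Int.floordiv k 2 + 1 = ((k.toNat / 2 + 1 : Nat) : Int) := by
    rw [PySem.Int.floordiv_eq_ediv_of_pos (by omega)]
    omega
  rw [hK, map_pyRange_natCast, sum_map_range]
  have hterm : ∀ i : Nat, ncr (t:Int) (i:Int) * ncr (t:Int) (k - 2*(i:Int)) = cho t i * cho t (k - 2*(i:Int)) := by
    intro i; rw [ncr_eq, ncr_eq]
  rw [Finset.sum_congr rfl (fun i _ => hterm i)]
  unfold Q
  set f : Nat → Int := fun i => cho t (i:Int) * cho t (k - 2*(i:Int)) with hf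
  have h1 : ∑ i ∈ Finset.range (k.toNat / 2 + 1), f i
      = ∑ i ∈ Finset.range (max (k.toNat / 2 + 1) (t + 1)), f i := by
    apply sum_ext_zero _ _ (le_max_left _ _)
    intro i hi
    rw [hf]
    simp only
    rw [cho_neg (show k - 2*(i:Int) < 0 by omega)]
    ring
  have h2 : ∑ i ∈ Finset.range (t + 1), f i
      = ∑ i ∈ Finset.range (max (k.toNat / 2 + 1) (t + 1)), f i := by
    apply sum_ext_zero _ _ (le_max_right _ _)
    intro i hi
    rw [hf]
    simp only
    rw [cho_gt (show (t:Int) < (i:Int) by omega)]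
    ring
  rw [zero_add, h1, ← h2]

def Ln (t : Nat) : Nat := (3 * t + 2) / 2
def halfQ (t : Nat) : List Int := (List.range (Ln t)).map (fun k : Nat => Q t (k : Int))

theorem halfQ_get (t i : Nat) (h : i < (halfQ t).length) : (halfQ t)[i] = Q t (i : Int) := by
  simp only [halfQ]
  rw [List.getElem_map, List.getElem_range]

theorem halfQ_len (t : Nat) : (halfQ t).length = Ln t := by simp [halfQ]

theorem half_eq (t : Nat) :
    (PySem.List.pyRange 0 (-(PySem.Int.floordiv (-(3 * (t : Int) + 1)) 2)) 1).map
      (fun k => get_coefficient (t : Int) k) = halfQ t := by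
  have hb : -(PySem.Int.floordiv (-(3 * (t : Int) + 1)) 2) = ((Ln t : Nat) : Int) := by
    rw [PySem.Int.floordiv_eq_ediv_of_pos (by norm_num)]
    unfold Ln
    omega
  rw [hb, map_pyRange_natCast]
  unfold halfQ
  apply List.map_congr_left
  intro k _
  exact get_coefficient_eq t (k : Int) (by omega)

theorem rowQ_len (t : Nat) : (rowQ t).length = 3 * t + 1 := by simp [rowQ]

theorem rowQ_get' (t i : Nat) (h : i < (rowQ t).length) : (rowQ t)[i] = Q t (i : Int) := by
  simp only [rowQ]
  rw [List.getElem_map, List.getElem_range]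

theorem Q_symm_nat (t i j : Nat) (h : i + j = 3 * t) : Q t (i : Int) = Q t (j : Int) := by
  have : (i : Int) = 3 * (t : Int) - (j : Int) := by omega
  rw [this, Q_symm]

theorem mirror_odd (t : Nat) (h2 : t % 2 = 1) : halfQ t ++ (halfQ t).reverse = rowQ t := by
  have hL : 2 * Ln t = 3 * t + 1 := by unfold Ln; omega
  apply List.ext_getElem
  · simp [halfQ_len, rowQ_len]; omega
  · intro i hi _
    rw [rowQ_get']
    by_cases hiL : i < Ln t
    · rw [List.getElem_append_left (by rw [halfQ_len]; omega), halfQ_get]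
    · rw [List.getElem_append_right (by rw [halfQ_len]; omega)]
      rw [List.getElem_reverse, halfQ_get]
      apply Q_symm_nat
      simp only [List.length_append, List.length_reverse, halfQ_len] at hi ⊢
      omega

theorem mirror_even (t : Nat) (h2 : t % 2 = 0) :
    halfQ t ++ (halfQ t).dropLast.reverse = rowQ t := by
  have hL : 2 * Ln t = 3 * t + 2 := by unfold Ln; omega
  apply List.ext_getElem
  · simp [halfQ_len, rowQ_len]; omega
  · intro i hi _
    rw [rowQ_get']
    by_cases hiL : i < Ln t
    · rw [List.getElem_append_left (by rw [halfQ_len]; omega), halfQ_get]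
    · rw [List.getElem_append_right (by rw [halfQ_len]; omega)]
      rw [List.getElem_reverse, List.getElem_dropLast, halfQ_get]
      apply Q_symm_nat
      simp only [List.length_append, List.length_reverse, List.length_dropLast, halfQ_len] at hi ⊢
      omega

theorem a_eq_rowQ (t : Nat) : get_bp_coefficients (t : Int) = rowQ t := by
  simp only [get_bp_coefficients]
  rw [half_eq]
  by_cases ht : t = 0
  · subst ht
    rw [if_pos (by norm_num)]
    simp [halfQ, rowQ, Ln]
  · rw [if_neg (by omega)]
    rcases Nat.even_or_odd t with he | ho
    · have h2 : t % 2 = 0 := Nat.even_iff.mp he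
      rw [if_neg (by rw [PySem.Int.mod_eq_emod_of_pos (by norm_num)]; omega)]
      exact mirror_even t h2
    · have h2 : t % 2 = 1 := Nat.odd_iff.mp ho
      rw [if_pos (by rw [PySem.Int.mod_eq_emod_of_pos (by norm_num)]; omega)]
      exact mirror_odd t h2

theorem a_neg (n : Int) (h : n < 0) : get_bp_coefficients n = [] := by
  simp only [get_bp_coefficients]
  have hb : PySem.List.pyRange 0 (-(PySem.Int.floordiv (-(3 * n + 1)) 2)) 1 = [] := by
    apply PySem.List.pyRange_one_eq_nil
    rw [PySem.Int.floordiv_eq_ediv_of_pos (by norm_num)]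
    omega
  rw [hb]
  simp only [List.map_nil]
  rw [if_neg (by omega)]
  split_ifs <;> simp


-- ===== VERDICT (by name: the statement is the Claim_ definition above) =====
theorem get_bp_coefficients_spec : Claim_equal_get_bp_coefficients := by
  intro n _
  unfold Spec_get_bp_coefficients
  rcases lt_or_ge n 0 with hn | hn
  · rw [a_neg n hn, get_bp_coefficients_alt, if_pos hn]
  · obtain ⟨t, rfl⟩ : ∃ t : Nat, n = (t : Int) := ⟨n.toNat, by omega⟩
    rw [a_eq_rowQ, alt_eq_rowQ]
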